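-- pv_equiv track=rewrite | github.com/Cicerolibardi/mc102 | funções/novo.py | destacar_bordas
-- ===== SOURCE A (Python) =====
-- def destacar_bordas(largura, altura, imagem):
--     nova_imagem = []
--     for linha in imagem:
--         inserir_nova_imagem = []
--         for elemento in linha:
--             inserir_nova_imagem.append(str(elemento))
--         nova_imagem.append(inserir_nova_imagem)
--
--     for i in range(altura):
--         for j in range(largura):
--             if (i == 0) or (i == altura -1):
--                 nova_imagem[i][j] = imagem[i][j]
--             elif (j == 0) or (j == largura - 1):
--                 nova_imagem[i][j] = imagem[i][j]
--             else:
--                 if imagem[i][j] == '1':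
--                     fronteira = False
--                     for i_linha in range(i-1,i+2):
--                         for j_coluna in range(j-1,j+2):
--                             if imagem[i_linha][j_coluna] == '0':
--                                 fronteira = True
--                     if fronteira == True:
--                         nova_imagem[i][j] = '1'
--                     else:
--                         nova_imagem[i][j] = '0'
--
--     return nova_imagem
-- ===== SOURCE B (Python) =====
-- def destacar_bordas(largura, altura, imagem):
--     # scatter from zeros: copy, blank interior ones, then each '0' cell marks
--     # its interior '1' neighbors back to '1'
--     nova_imagem = [[str(elemento) for elemento in linha] for linha in imagem]
--     for i in range(altura):
--         for j in range(largura):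
--             if i == 0 or i == altura - 1 or j == 0 or j == largura - 1:
--                 nova_imagem[i][j] = imagem[i][j]
--             elif imagem[i][j] == '1':
--                 nova_imagem[i][j] = '0'
--     for i in range(altura):
--         for j in range(largura):
--             if imagem[i][j] == '0':
--                 for a in range(i - 1, i + 2):
--                     for b in range(j - 1, j + 2):
--                         if 1 <= a <= altura - 2 and 1 <= b <= largura - 2 and imagem[a][b] == '1':
--                             nova_imagem[a][b] = '1'
--     return nova_imagem
-- ===== Notes on version B (the rewrite author's own statement) =====
-- stated objective: alternative
-- what changed: B inverts the traversal: instead of A's gather pass where each interior '1' scans its 3x3 neighbourhood for a '0', B first blanks every interior '1' to '0' and then scatters from every '0' cell, marking its interior '1' neighbours back to '1'.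
import Mathlib
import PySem

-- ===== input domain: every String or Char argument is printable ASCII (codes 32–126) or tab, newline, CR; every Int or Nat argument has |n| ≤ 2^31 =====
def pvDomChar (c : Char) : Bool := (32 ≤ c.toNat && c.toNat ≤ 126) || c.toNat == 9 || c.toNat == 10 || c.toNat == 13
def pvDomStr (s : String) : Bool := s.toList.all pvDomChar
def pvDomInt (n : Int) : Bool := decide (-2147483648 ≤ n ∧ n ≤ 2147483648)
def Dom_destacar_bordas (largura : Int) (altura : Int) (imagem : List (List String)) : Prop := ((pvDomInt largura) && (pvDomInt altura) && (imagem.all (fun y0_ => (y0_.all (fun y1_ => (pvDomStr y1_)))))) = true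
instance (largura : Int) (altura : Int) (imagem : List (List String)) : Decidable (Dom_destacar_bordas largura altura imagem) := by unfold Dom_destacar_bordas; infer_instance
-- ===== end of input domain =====

-- B rewrites A's gather (each interior '1' scans its 3×3 block for a '0') as a scatter
-- (each '0' cell marks its interior '1' neighbours); objective: alternative decomposition.

-- nova[i][j] read / write helpers shared by both ports (Python indexing semantics;
-- in-range on every input admitted by Pre_)
def pvGet2 (m : List (List String)) (i j : Int) : String :=
  PySem.List.pyGetD (PySem.List.pyGetD m i []) j ""

def pvSet2 (m : List (List String)) (i j : Int) (v : String) : List (List String) :=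
  PySem.List.pySetD m i (PySem.List.pySetD (PySem.List.pyGetD m i []) j v)

-- ===== PORT A =====
-- str(elemento) on a str is the identity; ported as the element itself.
def destacar_bordas (largura : Int) (altura : Int) (imagem : List (List String)) : List (List String) :=
  (PySem.List.pyRange 0 altura 1).foldl (fun nv i =>
    (PySem.List.pyRange 0 largura 1).foldl (fun nv j =>
      if i == 0 || i == altura - 1 then
        pvSet2 nv i j (pvGet2 imagem i j)
      else if j == 0 || j == largura - 1 then
        pvSet2 nv i j (pvGet2 imagem i j)
      else if pvGet2 imagem i j == "1" then
        (if ((PySem.List.pyRange (i-1) (i+2) 1).foldl (fun fronteira i_linha =>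
              (PySem.List.pyRange (j-1) (j+2) 1).foldl (fun fronteira j_coluna =>
                if pvGet2 imagem i_linha j_coluna == "0" then true else fronteira) fronteira) false) == true
         then pvSet2 nv i j "1" else pvSet2 nv i j "0")
      else nv) nv)
    (imagem.foldl (fun acc linha =>
      acc ++ [linha.foldl (fun r elemento => r ++ [elemento]) []]) [])

-- ===== PORT B =====
def destacar_bordas_alt (largura : Int) (altura : Int) (imagem : List (List String)) : List (List String) :=
  (PySem.List.pyRange 0 altura 1).foldl (fun nv i =>
    (PySem.List.pyRange 0 largura 1).foldl (fun nv j =>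
      if pvGet2 imagem i j == "0" then
        (PySem.List.pyRange (i-1) (i+2) 1).foldl (fun nv a =>
          (PySem.List.pyRange (j-1) (j+2) 1).foldl (fun nv b =>
            if decide (1 ≤ a) && decide (a ≤ altura - 2) && decide (1 ≤ b) && decide (b ≤ largura - 2)
               && (pvGet2 imagem a b == "1") then
              pvSet2 nv a b "1"
            else nv) nv) nv
      else nv) nv)
    ((PySem.List.pyRange 0 altura 1).foldl (fun nv i =>
      (PySem.List.pyRange 0 largura 1).foldl (fun nv j =>
        if i == 0 || i == altura - 1 || j == 0 || j == largura - 1 then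
          pvSet2 nv i j (pvGet2 imagem i j)
        else if pvGet2 imagem i j == "1" then
          pvSet2 nv i j "0"
        else nv) nv)
      (imagem.map (fun linha => linha.map (fun elemento => elemento))))

-- ===== PRECONDITION & SPEC =====
-- Pre_ excludes exactly the inputs on which the Python A raises IndexError:
-- 1 ≤ altura and 1 ≤ largura with fewer than altura rows, or some of the first
-- altura rows shorter than largura.  (The Lean ports are total — out-of-range
-- writes are no-ops and out-of-range reads default — and agree even there, so
-- the equivalence proof itself does not need this hypothesis.)
def Pre_destacar_bordas (largura : Int) (altura : Int) (imagem : List (List String)) : Prop :=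
  largura ≤ 0 ∨ altura ≤ 0 ∨
    (altura ≤ (imagem.length : Int) ∧
      ∀ row ∈ imagem.take altura.toNat, largura ≤ (row.length : Int))
instance (largura : Int) (altura : Int) (imagem : List (List String)) : Decidable (Pre_destacar_bordas largura altura imagem) := by unfold Pre_destacar_bordas; infer_instance

def pvWitness_destacar_bordas : Int × Int × List (List String) :=
  (3, 3, [["0", "1", "1"], ["1", "1", "1"], ["1", "1", "0"]])

def Spec_destacar_bordas (largura : Int) (altura : Int) (imagem : List (List String)) (out : List (List String)) : Prop := out = destacar_bordas_alt largura altura imagem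
instance (largura : Int) (altura : Int) (imagem : List (List String)) (out : List (List String)) : Decidable (Spec_destacar_bordas largura altura imagem out) := by unfold Spec_destacar_bordas; infer_instance

-- ===== CLAIM (what is proved, stated in full; the proofs are below) =====
def Claim_equal_destacar_bordas : Prop := ∀ (largura : Int) (altura : Int) (imagem : List (List String)), Dom_destacar_bordas largura altura imagem → Pre_destacar_bordas largura altura imagem → Spec_destacar_bordas largura altura imagem (destacar_bordas largura altura imagem)

-- ===== LEMMAS AND PROOFS =====

def pvShape (m : List (List String)) : List Nat := m.map List.length

-- Bool conditions used to state the loop characterisations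
def pvBorderB (largura altura : Int) (p q : Int) : Bool :=
  (p == 0) || (p == altura - 1) || (q == 0) || (q == largura - 1)

def pvFrB (m : List (List String)) (p q : Int) : Bool :=
  (PySem.List.pyRange (p-1) (p+2) 1).any fun a =>
    (PySem.List.pyRange (q-1) (q+2) 1).any fun b => pvGet2 m a b == "0"

def pvC (largura altura : Int) (m : List (List String)) (a b : Int) : Bool :=
  decide (1 ≤ a) && decide (a ≤ altura - 2) && decide (1 ≤ b) && decide (b ≤ largura - 2)
    && (pvGet2 m a b == "1")

def pvWscB (largura altura : Int) (m : List (List String)) (p q : Int) : Bool :=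
  (PySem.List.pyRange 0 altura 1).any fun i =>
    (PySem.List.pyRange 0 largura 1).any fun j =>
      (pvGet2 m i j == "0") &&
        ((PySem.List.pyRange (i-1) (i+2) 1).any fun a =>
          (PySem.List.pyRange (j-1) (j+2) 1).any fun b =>
            pvC largura altura m a b && (a == p) && (b == q))

lemma pvShape_length {m1 m2 : List (List String)} (h : pvShape m1 = pvShape m2) :
    m1.length = m2.length := by
  simpa [pvShape] using congrArg List.length h

lemma pvShape_row {m1 m2 : List (List String)} (h : pvShape m1 = pvShape m2) (p : Nat) :
    (m1.getD p []).length = (m2.getD p []).length := by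
  have h' := congrArg (fun l => l[p]?) h
  simp only [pvShape, List.getElem?_map] at h'
  cases h1 : m1[p]? <;> cases h2 : m2[p]? <;>
    simp [h1, h2, List.getD_eq_getElem?_getD] at h' ⊢ <;> simp [h']

lemma pvShape_set2 (m : List (List String)) (a b : Int) (v : String)
    (ha : 0 ≤ a) (hb : 0 ≤ b) : pvShape (pvSet2 m a b v) = pvShape m := by
  obtain ⟨n, rfl⟩ : ∃ n : Nat, a = (n : Int) := ⟨a.toNat, (Int.toNat_of_nonneg ha).symm⟩
  obtain ⟨k, rfl⟩ : ∃ k : Nat, b = (k : Int) := ⟨b.toNat, (Int.toNat_of_nonneg hb).symm⟩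
  simp only [pvSet2, pvShape, PySem.List.pySetD_natCast, PySem.List.pyGetD_natCast]
  rcases lt_or_ge n m.length with h | h
  · apply List.ext_getElem (by simp)
    intro i hi _
    simp [List.getElem_set, List.getD_eq_getElem?_getD]
    intro he; subst he; simp [List.getElem?_eq_getElem h]
  · rw [List.set_eq_of_length_le h]

lemma pvGet2_set2 (nv : List (List String)) (a b : Int) (v : String) (p q : Nat)
    (ha : 0 ≤ a) (hb : 0 ≤ b) (hp : p < nv.length) (hq : q < (nv.getD p []).length) :
    pvGet2 (pvSet2 nv a b v) p q = if a = (p : Int) ∧ b = (q : Int) then v else pvGet2 nv p q := by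
  obtain ⟨n, rfl⟩ : ∃ n : Nat, a = (n : Int) := ⟨a.toNat, (Int.toNat_of_nonneg ha).symm⟩
  obtain ⟨k, rfl⟩ : ∃ k : Nat, b = (k : Int) := ⟨b.toNat, (Int.toNat_of_nonneg hb).symm⟩
  simp only [pvGet2, pvSet2, PySem.List.pySetD_natCast, PySem.List.pyGetD_natCast,
    Nat.cast_inj]
  by_cases hnp : n = p
  · subst hnp
    have h1 : (nv.set n ((nv.getD n []).set k v)).getD n [] = (nv.getD n []).set k v := by
      simp [List.getD_eq_getElem?_getD, List.getElem?_set_self', List.getElem?_eq_getElem hp]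
    rw [h1]
    by_cases hkq : k = q
    · subst hkq
      simp [List.getD_eq_getElem?_getD, List.getElem?_set_self',
        List.getElem?_eq_getElem (by simpa [List.getD_eq_getElem?_getD] using hq :
          k < (nv[n]?.getD []).length)]
    · rw [List.getD_eq_getElem?_getD, List.getElem?_set_ne hkq, if_neg (by tauto),
        List.getD_eq_getElem?_getD, List.getD_eq_getElem?_getD]
  · have h1 : (nv.set n ((nv.getD n []).set k v)).getD p [] = nv.getD p [] := by
      simp [List.getD_eq_getElem?_getD, List.getElem?_set_ne hnp]
    rw [h1, if_neg (by tauto)]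

lemma pvFoldlPres {γ M : Type} (l : List γ) (f : M → γ → M) (S : M → Prop)
    (hS : ∀ nv x, x ∈ l → S nv → S (f nv x)) :
    ∀ init, S init → S (l.foldl f init) := by
  induction l with
  | nil => intro init h; simpa using h
  | cons x xs ih =>
    intro init h
    exact ih (fun nv y hy => hS nv y (List.mem_cons_of_mem _ hy)) _
      (hS init x List.mem_cons_self h)

lemma pvFoldlCell {γ M : Type} (l : List γ) (f : M → γ → M) (g : M → String) (w : γ → Bool)
    (S : M → Prop) (val : String)
    (hS : ∀ nv x, x ∈ l → S nv → S (f nv x))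
    (hpres : ∀ nv x, x ∈ l → S nv → g (f nv x) = if w x then val else g nv) :
    ∀ init, S init → g (l.foldl f init) = if l.any w then val else g init := by
  induction l with
  | nil => simp
  | cons x xs ih =>
    intro init hinit
    have h1 := hpres init x List.mem_cons_self hinit
    have h2 := ih (fun nv y hy hs => hS nv y (List.mem_cons_of_mem _ hy) hs)
      (fun nv y hy hs => hpres nv y (List.mem_cons_of_mem _ hy) hs)
      (f init x) (hS init x List.mem_cons_self hinit)
    simp only [List.foldl_cons, List.any_cons]
    rw [h2, h1]
    by_cases hw : w x <;> by_cases hxs : xs.any w <;> simp [hw, hxs]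

lemma pvFoldlOr {γ : Type} (l : List γ) (g : γ → Bool) :
    ∀ b : Bool, l.foldl (fun acc x => acc || g x) b = (b || l.any g) := by
  induction l with
  | nil => simp
  | cons x xs ih => intro b; simp [List.foldl_cons, ih, Bool.or_assoc]

-- the fronteira accumulator loop in A computes pvFrB
lemma pvFr_fold (m : List (List String)) (i j : Int) :
    (PySem.List.pyRange (i-1) (i+2) 1).foldl (fun fronteira i_linha =>
      (PySem.List.pyRange (j-1) (j+2) 1).foldl (fun fronteira j_coluna =>
        if pvGet2 m i_linha j_coluna == "0" then true else fronteira) fronteira) false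
    = pvFrB m i j := by
  have h1 : (PySem.List.pyRange (i-1) (i+2) 1).foldl (fun fronteira i_linha =>
      (PySem.List.pyRange (j-1) (j+2) 1).foldl (fun fronteira j_coluna =>
        if pvGet2 m i_linha j_coluna == "0" then true else fronteira) fronteira) false
    = (PySem.List.pyRange (i-1) (i+2) 1).foldl (fun fronteira i_linha =>
        fronteira || (PySem.List.pyRange (j-1) (j+2) 1).any fun j_coluna =>
          pvGet2 m i_linha j_coluna == "0") false := by
    apply PySem.List.foldl_congr_mem
    intro acc a _
    exact PySem.List.foldl_if_true_eq _ _ _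
  rw [h1, pvFoldlOr]
  simp [pvFrB]

-- the copies built at the top of both ports are the image itself
lemma pvCopyA (m : List (List String)) :
    m.foldl (fun acc linha => acc ++ [linha.foldl (fun r elemento => r ++ [elemento]) []]) []
      = m := by
  rw [PySem.List.foldl_append_singleton_eq_map]
  have : ∀ l : List String, l.foldl (fun r elemento => r ++ [elemento]) [] = l := fun l => by
    simpa using PySem.List.foldl_append_singleton_eq_self (l := l) (acc := [])
  exact (List.map_congr_left (fun l _ => this l)).trans (List.map_id _)

lemma pvCopyB (m : List (List String)) :
    m.map (fun linha => linha.map (fun elemento => elemento)) = m := by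
  simp

-- write predicate of A's single pass at target cell (p,q)
def pvAW (largura altura : Int) (m : List (List String)) (p q : Nat) (i j : Int) : Bool :=
  (i == (p : Int)) && (j == (q : Int)) &&
    ((i == 0 || i == altura - 1) || (j == 0 || j == largura - 1) || (pvGet2 m i j == "1"))

lemma pvAW_any (largura altura : Int) (m : List (List String)) (p q : Nat) :
    ((PySem.List.pyRange 0 altura 1).any fun i =>
      (PySem.List.pyRange 0 largura 1).any (pvAW largura altura m p q i)) = true ↔
    ((p : Int) < altura ∧ (q : Int) < largura ∧
      (pvBorderB largura altura p q = true ∨ pvGet2 m p q = "1")) := by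
  simp only [List.any_eq_true, PySem.List.mem_pyRange_one, pvAW, pvBorderB,
    Bool.and_eq_true, Bool.or_eq_true, beq_iff_eq]
  constructor
  · rintro ⟨i, ⟨hi0, hiH⟩, j, ⟨hj0, hjW⟩, ⟨hip, hjq⟩, hrest⟩
    subst hip; subst hjq
    exact ⟨hiH, hjW, by tauto⟩
  · rintro ⟨hH, hW, hrest⟩
    exact ⟨p, ⟨by omega, hH⟩, q, ⟨by omega, hW⟩, ⟨rfl, rfl⟩, by tauto⟩

lemma pvA_shape (largura altura : Int) (m : List (List String)) :
    pvShape (destacar_bordas largura altura m) = pvShape m := by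
  simp only [destacar_bordas]
  rw [pvCopyA]
  refine pvFoldlPres _ _ (fun nv => pvShape nv = pvShape m) ?_ m rfl
  intro nv i hi hnv
  rw [PySem.List.mem_pyRange_one] at hi
  refine pvFoldlPres _ _ (fun nv => pvShape nv = pvShape m) ?_ nv hnv
  intro nv' j hj hnv'
  rw [PySem.List.mem_pyRange_one] at hj
  split_ifs <;>
    first
      | exact hnv'
      | (rw [pvShape_set2 _ _ _ _ (by omega) (by omega)]; exact hnv')

lemma pvA_char (largura altura : Int) (m : List (List String)) (p q : Nat)
    (hp : p < m.length) (hq : q < (m.getD p []).length) :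
    pvGet2 (destacar_bordas largura altura m) p q =
      if ((p : Int) < altura ∧ (q : Int) < largura ∧
          (pvBorderB largura altura p q = true ∨ pvGet2 m p q = "1")) then
        (if pvBorderB largura altura p q then pvGet2 m p q
         else if pvFrB m p q then "1" else "0")
      else pvGet2 m p q := by
  simp only [destacar_bordas]
  rw [pvCopyA]
  set val := (if pvBorderB largura altura p q then pvGet2 m p q
         else if pvFrB m p q then "1" else "0") with hval
  refine Eq.trans (pvFoldlCell (PySem.List.pyRange 0 altura 1) _
    (fun nv => pvGet2 nv p q)
    (fun i => (PySem.List.pyRange 0 largura 1).any (pvAW largura altura m p q i))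
    (fun nv => pvShape nv = pvShape m) val ?_ ?_ m rfl) ?_
  · -- shape preservation of a row step
    intro nv i hi hnv
    rw [PySem.List.mem_pyRange_one] at hi
    refine pvFoldlPres _ _ (fun nv => pvShape nv = pvShape m) ?_ nv hnv
    intro nv' j hj hnv'
    rw [PySem.List.mem_pyRange_one] at hj
    split_ifs <;>
      first
        | exact hnv'
        | (rw [pvShape_set2 _ _ _ _ (by omega) (by omega)]; exact hnv')
  · -- row step writes val at (p,q) exactly when some j fires
    intro nv i hi hnv
    rw [PySem.List.mem_pyRange_one] at hi
    refine Eq.trans (pvFoldlCell (PySem.List.pyRange 0 largura 1) _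
      (fun nv => pvGet2 nv p q) (pvAW largura altura m p q i)
      (fun nv => pvShape nv = pvShape m) val ?_ ?_ nv hnv) rfl
    · intro nv' j hj hnv'
      rw [PySem.List.mem_pyRange_one] at hj
      split_ifs <;>
        first
          | exact hnv'
          | (rw [pvShape_set2 _ _ _ _ (by omega) (by omega)]; exact hnv')
    · intro nv' j hj hnv'
      rw [PySem.List.mem_pyRange_one] at hj
      have hp' : p < nv'.length := by rw [pvShape_length hnv']; exact hp
      have hq' : q < (nv'.getD p []).length := by rw [pvShape_row hnv']; exact hq
      beta_reduce
      by_cases hb1 : (i == 0 || i == altura - 1) = true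
      · rw [if_pos hb1, pvGet2_set2 _ _ _ _ _ _ (by omega) (by omega) hp' hq']
        by_cases hij : i = (p : Int) ∧ j = (q : Int)
        · obtain ⟨hip, hjq⟩ := hij
          subst hip; subst hjq
          have hbord : pvBorderB largura altura p q = true := by
            simp only [Bool.or_eq_true, beq_iff_eq] at hb1
            simp only [pvBorderB, Bool.or_eq_true, beq_iff_eq]
            tauto
          rw [if_pos ⟨rfl, rfl⟩, if_pos (by simp [pvAW, hb1]), hval, if_pos hbord]
        · rw [if_neg hij, if_neg (by simp only [pvAW, Bool.and_eq_true, beq_iff_eq]; tauto)]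
      · by_cases hb2 : (j == 0 || j == largura - 1) = true
        · rw [if_neg hb1, if_pos hb2, pvGet2_set2 _ _ _ _ _ _ (by omega) (by omega) hp' hq']
          by_cases hij : i = (p : Int) ∧ j = (q : Int)
          · obtain ⟨hip, hjq⟩ := hij
            subst hip; subst hjq
            have hbord : pvBorderB largura altura p q = true := by
              simp only [Bool.or_eq_true, beq_iff_eq] at hb2
              simp only [pvBorderB, Bool.or_eq_true, beq_iff_eq]
              tauto
            rw [if_pos ⟨rfl, rfl⟩, if_pos (by simp [pvAW, hb2]), hval, if_pos hbord]
          · rw [if_neg hij, if_neg (by simp only [pvAW, Bool.and_eq_true, beq_iff_eq]; tauto)]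
        · rw [if_neg hb1, if_neg hb2]
          by_cases h1 : (pvGet2 m i j == "1") = true
          · rw [if_pos h1, pvFr_fold]
            by_cases hij : i = (p : Int) ∧ j = (q : Int)
            · obtain ⟨hip, hjq⟩ := hij
              subst hip; subst hjq
              have hbord : pvBorderB largura altura p q = false := by
                simp only [Bool.or_eq_true, beq_iff_eq] at hb1 hb2
                simp only [pvBorderB, Bool.or_eq_false_iff, beq_eq_false_iff_ne, ne_eq]
                tauto
              have hAW : pvAW largura altura m p q (p : Int) (q : Int) = true := by
                simp [pvAW, h1]
              by_cases hf : pvFrB m (p : Int) (q : Int) = true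
              · rw [if_pos (by simp [hf]), pvGet2_set2 _ _ _ _ _ _ (by omega) (by omega) hp' hq',
                  if_pos ⟨rfl, rfl⟩, if_pos hAW, hval, if_neg (by simp [hbord]), if_pos hf]
              · rw [if_neg (by simpa using hf), pvGet2_set2 _ _ _ _ _ _ (by omega) (by omega) hp' hq',
                  if_pos ⟨rfl, rfl⟩, if_pos hAW, hval, if_neg (by simp [hbord]),
                  if_neg hf]
            · have hAWn : ¬ pvAW largura altura m p q i j = true := by
                simp only [pvAW, Bool.and_eq_true, beq_iff_eq]
                intro hcon
                exact hij hcon.1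
              split_ifs with h <;>
                rw [pvGet2_set2 _ _ _ _ _ _ (by omega) (by omega) hp' hq', if_neg hij]
          · have hAWn : ¬ pvAW largura altura m p q i j = true := by
              simp only [pvAW, Bool.and_eq_true, Bool.or_eq_true]
              simp only [Bool.or_eq_true] at hb1 hb2
              tauto
            rw [if_neg h1, if_neg hAWn]
  · -- translate the any-condition
    by_cases hc : ((p : Int) < altura ∧ (q : Int) < largura ∧
        (pvBorderB largura altura p q = true ∨ pvGet2 m p q = "1"))
    · rw [if_pos ((pvAW_any largura altura m p q).mpr hc), if_pos hc]
    · rw [if_neg (fun hh => hc ((pvAW_any largura altura m p q).mp hh)), if_neg hc]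

lemma pvBorderB_iff (largura altura : Int) (p q : Nat) :
    pvBorderB largura altura p q = true ↔
      ((p : Int) = 0 ∨ (p : Int) = altura - 1 ∨ (q : Int) = 0 ∨ (q : Int) = largura - 1) := by
  simp [pvBorderB, Bool.or_eq_true, beq_iff_eq, or_assoc]

lemma pvFrB_iff (m : List (List String)) (p q : Int) :
    pvFrB m p q = true ↔
      ∃ a b : Int, p - 1 ≤ a ∧ a < p + 2 ∧ q - 1 ≤ b ∧ b < q + 2 ∧ pvGet2 m a b = "0" := by
  simp only [pvFrB, List.any_eq_true, PySem.List.mem_pyRange_one, beq_iff_eq]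
  constructor
  · rintro ⟨a, ⟨ha1, ha2⟩, b, ⟨hb1, hb2⟩, h0⟩
    exact ⟨a, b, ha1, ha2, hb1, hb2, h0⟩
  · rintro ⟨a, b, ha1, ha2, hb1, hb2, h0⟩
    exact ⟨a, ⟨ha1, ha2⟩, b, ⟨hb1, hb2⟩, h0⟩

lemma pvWscB_iff (largura altura : Int) (m : List (List String)) (p q : Nat) :
    pvWscB largura altura m p q = true ↔
      ∃ i j : Int, 0 ≤ i ∧ i < altura ∧ 0 ≤ j ∧ j < largura ∧ pvGet2 m i j = "0" ∧
        i - 1 ≤ (p : Int) ∧ (p : Int) < i + 2 ∧ j - 1 ≤ (q : Int) ∧ (q : Int) < j + 2 ∧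
        1 ≤ (p : Int) ∧ (p : Int) ≤ altura - 2 ∧ 1 ≤ (q : Int) ∧ (q : Int) ≤ largura - 2 ∧
        pvGet2 m p q = "1" := by
  simp only [pvWscB, pvC, List.any_eq_true, PySem.List.mem_pyRange_one, Bool.and_eq_true,
    beq_iff_eq, decide_eq_true_eq]
  constructor
  · rintro ⟨i, ⟨hi0, hiH⟩, j, ⟨hj0, hjW⟩, h0, a, ⟨ha1, ha2⟩, b, ⟨hb1, hb2⟩,
      ⟨⟨⟨⟨⟨hA1, hA2⟩, hB1⟩, hB2⟩, hg⟩, hap⟩, hbq⟩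
    subst hap; subst hbq
    exact ⟨i, j, hi0, hiH, hj0, hjW, h0, by omega, by omega, by omega, by omega,
      hA1, hA2, hB1, hB2, hg⟩
  · rintro ⟨i, j, hi0, hiH, hj0, hjW, h0, h1, h2, h3, h4, h5, h6, h7, h8, hg⟩
    exact ⟨i, ⟨hi0, hiH⟩, j, ⟨hj0, hjW⟩, h0, (p : Int), ⟨by omega, by omega⟩,
      (q : Int), ⟨by omega, by omega⟩, ⟨⟨⟨⟨⟨h5, h6⟩, h7⟩, h8⟩, hg⟩, rfl⟩, rfl⟩

-- write predicate of B's first pass at target cell (p,q)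
def pvBW (largura altura : Int) (m : List (List String)) (p q : Nat) (i j : Int) : Bool :=
  (i == (p : Int)) && (j == (q : Int)) &&
    ((i == 0 || i == altura - 1 || j == 0 || j == largura - 1) || (pvGet2 m i j == "1"))

lemma pvBW_any (largura altura : Int) (m : List (List String)) (p q : Nat) :
    ((PySem.List.pyRange 0 altura 1).any fun i =>
      (PySem.List.pyRange 0 largura 1).any (pvBW largura altura m p q i)) = true ↔
    ((p : Int) < altura ∧ (q : Int) < largura ∧
      (pvBorderB largura altura p q = true ∨ pvGet2 m p q = "1")) := by
  simp only [List.any_eq_true, PySem.List.mem_pyRange_one, pvBW, pvBorderB,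
    Bool.and_eq_true, Bool.or_eq_true, beq_iff_eq]
  constructor
  · rintro ⟨i, ⟨hi0, hiH⟩, j, ⟨hj0, hjW⟩, ⟨hip, hjq⟩, hrest⟩
    subst hip; subst hjq
    exact ⟨hiH, hjW, by tauto⟩
  · rintro ⟨hH, hW, hrest⟩
    exact ⟨p, ⟨by omega, hH⟩, q, ⟨by omega, hW⟩, ⟨rfl, rfl⟩, by tauto⟩

lemma pvB1_shape (largura altura : Int) (m : List (List String)) :
    pvShape ((PySem.List.pyRange 0 altura 1).foldl (fun nv i =>
      (PySem.List.pyRange 0 largura 1).foldl (fun nv j =>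
        if i == 0 || i == altura - 1 || j == 0 || j == largura - 1 then
          pvSet2 nv i j (pvGet2 m i j)
        else if pvGet2 m i j == "1" then
          pvSet2 nv i j "0"
        else nv) nv) m) = pvShape m := by
  refine pvFoldlPres _ _ (fun nv => pvShape nv = pvShape m) ?_ m rfl
  intro nv i hi hnv
  rw [PySem.List.mem_pyRange_one] at hi
  refine pvFoldlPres _ _ (fun nv => pvShape nv = pvShape m) ?_ nv hnv
  intro nv' j hj hnv'
  rw [PySem.List.mem_pyRange_one] at hj
  split_ifs <;>
    first
      | exact hnv'
      | (rw [pvShape_set2 _ _ _ _ (by omega) (by omega)]; exact hnv')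

lemma pvB1_char (largura altura : Int) (m : List (List String)) (p q : Nat)
    (hp : p < m.length) (hq : q < (m.getD p []).length) :
    pvGet2 ((PySem.List.pyRange 0 altura 1).foldl (fun nv i =>
      (PySem.List.pyRange 0 largura 1).foldl (fun nv j =>
        if i == 0 || i == altura - 1 || j == 0 || j == largura - 1 then
          pvSet2 nv i j (pvGet2 m i j)
        else if pvGet2 m i j == "1" then
          pvSet2 nv i j "0"
        else nv) nv) m) p q =
      if ((p : Int) < altura ∧ (q : Int) < largura ∧
          (pvBorderB largura altura p q = true ∨ pvGet2 m p q = "1")) then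
        (if pvBorderB largura altura p q then pvGet2 m p q else "0")
      else pvGet2 m p q := by
  set val := (if pvBorderB largura altura p q then pvGet2 m p q else "0") with hval
  refine Eq.trans (pvFoldlCell (PySem.List.pyRange 0 altura 1) _
    (fun nv => pvGet2 nv p q)
    (fun i => (PySem.List.pyRange 0 largura 1).any (pvBW largura altura m p q i))
    (fun nv => pvShape nv = pvShape m) val ?_ ?_ m rfl) ?_
  · intro nv i hi hnv
    rw [PySem.List.mem_pyRange_one] at hi
    refine pvFoldlPres _ _ (fun nv => pvShape nv = pvShape m) ?_ nv hnv
    intro nv' j hj hnv'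
    rw [PySem.List.mem_pyRange_one] at hj
    split_ifs <;>
      first
        | exact hnv'
        | (rw [pvShape_set2 _ _ _ _ (by omega) (by omega)]; exact hnv')
  · intro nv i hi hnv
    rw [PySem.List.mem_pyRange_one] at hi
    refine Eq.trans (pvFoldlCell (PySem.List.pyRange 0 largura 1) _
      (fun nv => pvGet2 nv p q) (pvBW largura altura m p q i)
      (fun nv => pvShape nv = pvShape m) val ?_ ?_ nv hnv) rfl
    · intro nv' j hj hnv'
      rw [PySem.List.mem_pyRange_one] at hj
      split_ifs <;>
        first
          | exact hnv'
          | (rw [pvShape_set2 _ _ _ _ (by omega) (by omega)]; exact hnv')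
    · intro nv' j hj hnv'
      rw [PySem.List.mem_pyRange_one] at hj
      have hp' : p < nv'.length := by rw [pvShape_length hnv']; exact hp
      have hq' : q < (nv'.getD p []).length := by rw [pvShape_row hnv']; exact hq
      beta_reduce
      by_cases hb : (i == 0 || i == altura - 1 || j == 0 || j == largura - 1) = true
      · rw [if_pos hb, pvGet2_set2 _ _ _ _ _ _ (by omega) (by omega) hp' hq']
        by_cases hij : i = (p : Int) ∧ j = (q : Int)
        · obtain ⟨hip, hjq⟩ := hij
          subst hip; subst hjq
          have hbord : pvBorderB largura altura p q = true := hb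
          rw [if_pos ⟨rfl, rfl⟩, if_pos (by simp [pvBW, hb]), hval, if_pos hbord]
        · rw [if_neg hij, if_neg (by simp only [pvBW, Bool.and_eq_true, beq_iff_eq]; tauto)]
      · rw [if_neg hb]
        by_cases h1 : (pvGet2 m i j == "1") = true
        · rw [if_pos h1, pvGet2_set2 _ _ _ _ _ _ (by omega) (by omega) hp' hq']
          by_cases hij : i = (p : Int) ∧ j = (q : Int)
          · obtain ⟨hip, hjq⟩ := hij
            subst hip; subst hjq
            have hbord : pvBorderB largura altura p q = false := by
              rw [show pvBorderB largura altura p q =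
                ((p : Int) == 0 || (p : Int) == altura - 1 || (q : Int) == 0 ||
                  (q : Int) == largura - 1) from rfl]
              exact Bool.not_eq_true _ ▸ hb
            rw [if_pos ⟨rfl, rfl⟩, if_pos (by simp [pvBW, h1]), hval, if_neg (by simp [hbord])]
          · rw [if_neg hij, if_neg (by simp only [pvBW, Bool.and_eq_true, beq_iff_eq]; tauto)]
        · have hBWn : ¬ pvBW largura altura m p q i j = true := by
            simp only [pvBW, Bool.and_eq_true, Bool.or_eq_true]
            simp only [Bool.or_eq_true] at hb
            tauto
          rw [if_neg h1, if_neg hBWn]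
  · by_cases hc : ((p : Int) < altura ∧ (q : Int) < largura ∧
        (pvBorderB largura altura p q = true ∨ pvGet2 m p q = "1"))
    · rw [if_pos ((pvBW_any largura altura m p q).mpr hc), if_pos hc]
    · rw [if_neg (fun hh => hc ((pvBW_any largura altura m p q).mp hh)), if_neg hc]

lemma pvScat_shape (largura altura : Int) (m : List (List String))
    (init : List (List String)) (hinit : pvShape init = pvShape m) :
    pvShape ((PySem.List.pyRange 0 altura 1).foldl (fun nv i =>
      (PySem.List.pyRange 0 largura 1).foldl (fun nv j =>
        if pvGet2 m i j == "0" then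
          (PySem.List.pyRange (i-1) (i+2) 1).foldl (fun nv a =>
            (PySem.List.pyRange (j-1) (j+2) 1).foldl (fun nv b =>
              if decide (1 ≤ a) && decide (a ≤ altura - 2) && decide (1 ≤ b) &&
                 decide (b ≤ largura - 2) && (pvGet2 m a b == "1") then
                pvSet2 nv a b "1"
              else nv) nv) nv
        else nv) nv) init) = pvShape m := by
  refine pvFoldlPres _ _ (fun nv => pvShape nv = pvShape m) ?_ init hinit
  intro nv i _ hnv
  refine pvFoldlPres _ _ (fun nv => pvShape nv = pvShape m) ?_ nv hnv
  intro nv1 j _ hnv1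
  beta_reduce
  split_ifs with h0
  · refine pvFoldlPres _ _ (fun nv => pvShape nv = pvShape m) ?_ nv1 hnv1
    intro nv2 a _ hnv2
    refine pvFoldlPres _ _ (fun nv => pvShape nv = pvShape m) ?_ nv2 hnv2
    intro nv3 b _ hnv3
    beta_reduce
    split_ifs with hc
    · simp only [Bool.and_eq_true, decide_eq_true_eq] at hc
      obtain ⟨⟨⟨⟨ha1, ha2⟩, hb1⟩, hb2⟩, hg⟩ := hc
      rw [pvShape_set2 _ _ _ _ (by omega) (by omega)]
      exact hnv3
    · exact hnv3
  · exact hnv1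

lemma pvScat_char (largura altura : Int) (m : List (List String)) (p q : Nat)
    (hp : p < m.length) (hq : q < (m.getD p []).length)
    (init : List (List String)) (hinit : pvShape init = pvShape m) :
    pvGet2 ((PySem.List.pyRange 0 altura 1).foldl (fun nv i =>
      (PySem.List.pyRange 0 largura 1).foldl (fun nv j =>
        if pvGet2 m i j == "0" then
          (PySem.List.pyRange (i-1) (i+2) 1).foldl (fun nv a =>
            (PySem.List.pyRange (j-1) (j+2) 1).foldl (fun nv b =>
              if decide (1 ≤ a) && decide (a ≤ altura - 2) && decide (1 ≤ b) &&
                 decide (b ≤ largura - 2) && (pvGet2 m a b == "1") then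
                pvSet2 nv a b "1"
              else nv) nv) nv
        else nv) nv) init) p q =
      if pvWscB largura altura m p q then "1" else pvGet2 init p q := by
  refine Eq.trans (pvFoldlCell (PySem.List.pyRange 0 altura 1) _
    (fun nv => pvGet2 nv p q)
    (fun i => (PySem.List.pyRange 0 largura 1).any fun j =>
      (pvGet2 m i j == "0") &&
        ((PySem.List.pyRange (i-1) (i+2) 1).any fun a =>
          (PySem.List.pyRange (j-1) (j+2) 1).any fun b =>
            pvC largura altura m a b && (a == (p : Int)) && (b == (q : Int))))
    (fun nv => pvShape nv = pvShape m) "1" ?_ ?_ init hinit) rfl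
  · intro nv i _ hnv
    refine pvFoldlPres _ _ (fun nv => pvShape nv = pvShape m) ?_ nv hnv
    intro nv1 j _ hnv1
    beta_reduce
    split_ifs with h0
    · refine pvFoldlPres _ _ (fun nv => pvShape nv = pvShape m) ?_ nv1 hnv1
      intro nv2 a _ hnv2
      refine pvFoldlPres _ _ (fun nv => pvShape nv = pvShape m) ?_ nv2 hnv2
      intro nv3 b _ hnv3
      beta_reduce
      split_ifs with hc
      · simp only [Bool.and_eq_true, decide_eq_true_eq] at hc
        obtain ⟨⟨⟨⟨ha1, ha2⟩, hb1⟩, hb2⟩, hg⟩ := hc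
        rw [pvShape_set2 _ _ _ _ (by omega) (by omega)]
        exact hnv3
      · exact hnv3
    · exact hnv1
  · intro nv i _ hnv
    refine Eq.trans (pvFoldlCell (PySem.List.pyRange 0 largura 1) _
      (fun nv => pvGet2 nv p q)
      (fun j => (pvGet2 m i j == "0") &&
        ((PySem.List.pyRange (i-1) (i+2) 1).any fun a =>
          (PySem.List.pyRange (j-1) (j+2) 1).any fun b =>
            pvC largura altura m a b && (a == (p : Int)) && (b == (q : Int))))
      (fun nv => pvShape nv = pvShape m) "1" ?_ ?_ nv hnv) rfl
    · intro nv1 j _ hnv1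
      beta_reduce
      split_ifs with h0
      · refine pvFoldlPres _ _ (fun nv => pvShape nv = pvShape m) ?_ nv1 hnv1
        intro nv2 a _ hnv2
        refine pvFoldlPres _ _ (fun nv => pvShape nv = pvShape m) ?_ nv2 hnv2
        intro nv3 b _ hnv3
        beta_reduce
        split_ifs with hc
        · simp only [Bool.and_eq_true, decide_eq_true_eq] at hc
          obtain ⟨⟨⟨⟨ha1, ha2⟩, hb1⟩, hb2⟩, hg⟩ := hc
          rw [pvShape_set2 _ _ _ _ (by omega) (by omega)]
          exact hnv3
        · exact hnv3
      · exact hnv1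
    · intro nv1 j _ hnv1
      beta_reduce
      by_cases h0 : (pvGet2 m i j == "0") = true
      · rw [if_pos h0]
        refine Eq.trans (pvFoldlCell (PySem.List.pyRange (i-1) (i+2) 1) _
          (fun nv => pvGet2 nv p q)
          (fun a => (PySem.List.pyRange (j-1) (j+2) 1).any fun b =>
            pvC largura altura m a b && (a == (p : Int)) && (b == (q : Int)))
          (fun nv => pvShape nv = pvShape m) "1" ?_ ?_ nv1 hnv1) ?_
        · intro nv2 a _ hnv2
          refine pvFoldlPres _ _ (fun nv => pvShape nv = pvShape m) ?_ nv2 hnv2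
          intro nv3 b _ hnv3
          beta_reduce
          split_ifs with hc
          · simp only [Bool.and_eq_true, decide_eq_true_eq] at hc
            obtain ⟨⟨⟨⟨ha1, ha2⟩, hb1⟩, hb2⟩, hg⟩ := hc
            rw [pvShape_set2 _ _ _ _ (by omega) (by omega)]
            exact hnv3
          · exact hnv3
        · intro nv2 a _ hnv2
          refine Eq.trans (pvFoldlCell (PySem.List.pyRange (j-1) (j+2) 1) _
            (fun nv => pvGet2 nv p q)
            (fun b => pvC largura altura m a b && (a == (p : Int)) && (b == (q : Int)))
            (fun nv => pvShape nv = pvShape m) "1" ?_ ?_ nv2 hnv2) rfl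
          · intro nv3 b _ hnv3
            beta_reduce
            split_ifs with hc
            · simp only [Bool.and_eq_true, decide_eq_true_eq] at hc
              obtain ⟨⟨⟨⟨ha1, ha2⟩, hb1⟩, hb2⟩, hg⟩ := hc
              rw [pvShape_set2 _ _ _ _ (by omega) (by omega)]
              exact hnv3
            · exact hnv3
          · intro nv3 b _ hnv3
            beta_reduce
            have hp' : p < nv3.length := by rw [pvShape_length hnv3]; exact hp
            have hq' : q < (nv3.getD p []).length := by rw [pvShape_row hnv3]; exact hq
            by_cases hc : (decide (1 ≤ a) && decide (a ≤ altura - 2) && decide (1 ≤ b) &&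
                decide (b ≤ largura - 2) && (pvGet2 m a b == "1")) = true
            · have hc' := hc
              simp only [Bool.and_eq_true, decide_eq_true_eq] at hc'
              obtain ⟨⟨⟨⟨ha1, ha2⟩, hb1⟩, hb2⟩, hg⟩ := hc'
              rw [if_pos hc, pvGet2_set2 _ _ _ _ _ _ (by omega) (by omega) hp' hq']
              by_cases hab : a = (p : Int) ∧ b = (q : Int)
              · obtain ⟨hap, hbq⟩ := hab
                subst hap; subst hbq
                rw [if_pos ⟨rfl, rfl⟩,
                  if_pos (by simp [show pvC largura altura m (p : Int) (q : Int) = true from hc])]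
              · rw [if_neg hab, if_neg (by
                  simp only [Bool.and_eq_true, beq_iff_eq]
                  tauto)]
            · have hCn : ¬ (pvC largura altura m a b && (a == (p : Int)) &&
                  (b == (q : Int))) = true := by
                intro hcon
                simp only [Bool.and_eq_true] at hcon
                exact hc hcon.1.1
              rw [if_neg hc, if_neg hCn]
        · simp only [h0, Bool.true_and]
      · rw [if_neg h0]
        rw [if_neg (by
          intro hcon
          simp only [Bool.and_eq_true] at hcon
          exact h0 hcon.1)]

lemma pvB_shape (largura altura : Int) (m : List (List String)) :
    pvShape (destacar_bordas_alt largura altura m) = pvShape m := by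
  simp only [destacar_bordas_alt]
  rw [pvCopyB]
  exact pvScat_shape largura altura m _ (pvB1_shape largura altura m)

lemma pvB_char (largura altura : Int) (m : List (List String)) (p q : Nat)
    (hp : p < m.length) (hq : q < (m.getD p []).length) :
    pvGet2 (destacar_bordas_alt largura altura m) p q =
      if pvWscB largura altura m p q then "1"
      else if ((p : Int) < altura ∧ (q : Int) < largura ∧
          (pvBorderB largura altura p q = true ∨ pvGet2 m p q = "1")) then
        (if pvBorderB largura altura p q then pvGet2 m p q else "0")
      else pvGet2 m p q := by
  simp only [destacar_bordas_alt]
  rw [pvCopyB]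
  rw [pvScat_char largura altura m p q hp hq _ (pvB1_shape largura altura m)]
  rw [pvB1_char largura altura m p q hp hq]

lemma pvGet2_eq_getElem (m : List (List String)) (p q : Nat) :
    pvGet2 m p q = (m.getD p []).getD q "" := by
  simp [pvGet2, PySem.List.pyGetD_natCast]

lemma pvEq_of_shape_get2 (m1 m2 : List (List String)) (hs : pvShape m1 = pvShape m2)
    (h : ∀ p q : Nat, p < m1.length → q < (m1.getD p []).length →
      pvGet2 m1 p q = pvGet2 m2 p q) : m1 = m2 := by
  have hl := pvShape_length hs
  apply List.ext_getElem hl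
  intro p h1 h2
  have hrow := pvShape_row hs p
  apply List.ext_getElem (by
    rw [List.getD_eq_getElem?_getD, List.getElem?_eq_getElem h1] at hrow
    rw [List.getD_eq_getElem?_getD, List.getElem?_eq_getElem h2] at hrow
    simpa using hrow)
  intro q hq1 hq2
  have := h p q h1 (by simpa [List.getD_eq_getElem?_getD, List.getElem?_eq_getElem h1] using hq1)
  rw [pvGet2_eq_getElem m1 p q, pvGet2_eq_getElem m2 p q] at this
  simpa [List.getD_eq_getElem?_getD, List.getElem?_eq_getElem h1, List.getElem?_eq_getElem h2,
    List.getElem?_eq_getElem hq1, List.getElem?_eq_getElem hq2] using this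

lemma pvPointwise (largura altura : Int) (m : List (List String)) (p q : Nat)
    (hp : p < m.length) (hq : q < (m.getD p []).length) :
    pvGet2 (destacar_bordas largura altura m) p q =
      pvGet2 (destacar_bordas_alt largura altura m) p q := by
  rw [pvA_char largura altura m p q hp hq, pvB_char largura altura m p q hp hq]
  by_cases hB : pvBorderB largura altura p q = true
  · have hW : ¬ pvWscB largura altura m p q = true := by
      rw [pvWscB_iff]
      rintro ⟨i, j, -, -, -, -, -, -, -, -, -, h5, h6, h7, h8, -⟩
      rw [pvBorderB_iff] at hB
      rcases hB with h | h | h | h <;> omega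
    rw [if_neg hW, if_pos hB, if_pos hB]
  · by_cases h1 : pvGet2 m p q = "1"
    · by_cases hHW : (p : Int) < altura ∧ (q : Int) < largura
      · have hcond : ((p : Int) < altura ∧ (q : Int) < largura ∧
            (pvBorderB largura altura p q = true ∨ pvGet2 m p q = "1")) :=
          ⟨hHW.1, hHW.2, Or.inr h1⟩
        rw [if_pos hcond, if_neg hB, if_pos hcond, if_neg hB]
        have hint : 1 ≤ (p : Int) ∧ (p : Int) ≤ altura - 2 ∧ 1 ≤ (q : Int) ∧
            (q : Int) ≤ largura - 2 := by
          rw [pvBorderB_iff] at hB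
          push Not at hB
          obtain ⟨b1, b2, b3, b4⟩ := hB
          refine ⟨by omega, by omega, by omega, by omega⟩
        by_cases hf : pvFrB m (p : Int) (q : Int) = true
        · rw [if_pos hf]
          obtain ⟨a, b, ha1, ha2, hb1, hb2, h0⟩ := (pvFrB_iff m (p : Int) (q : Int)).mp hf
          rw [if_pos ((pvWscB_iff largura altura m p q).mpr
            ⟨a, b, by omega, by omega, by omega, by omega, h0, by omega, by omega,
              by omega, by omega, hint.1, hint.2.1, hint.2.2.1, hint.2.2.2, h1⟩)]
        · rw [if_neg hf, if_neg (fun hw => by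
            obtain ⟨i, j, hi0, hiH, hj0, hjW, h0, d1, d2, d3, d4, -, -, -, -, -⟩ :=
              (pvWscB_iff largura altura m p q).mp hw
            exact hf ((pvFrB_iff m (p : Int) (q : Int)).mpr
              ⟨i, j, by omega, by omega, by omega, by omega, h0⟩))]
      · have hWn : ¬ pvWscB largura altura m p q = true := by
          rw [pvWscB_iff]
          rintro ⟨i, j, -, -, -, -, -, -, -, -, -, h5, h6, h7, h8, -⟩
          push Not at hHW
          by_cases hpH : (p : Int) < altura
          · exact absurd (hHW hpH) (by omega)
          · exact hpH (by omega)
        have hcn : ¬ ((p : Int) < altura ∧ (q : Int) < largura ∧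
            (pvBorderB largura altura p q = true ∨ pvGet2 m p q = "1")) := by
          intro hcon
          exact hHW ⟨hcon.1, hcon.2.1⟩
        rw [if_neg hWn, if_neg hcn, if_neg hcn]
    · have hWn : ¬ pvWscB largura altura m p q = true := by
        rw [pvWscB_iff]
        rintro ⟨i, j, -, -, -, -, -, -, -, -, -, -, -, -, -, hg⟩
        exact h1 hg
      have hcn : ¬ ((p : Int) < altura ∧ (q : Int) < largura ∧
          (pvBorderB largura altura p q = true ∨ pvGet2 m p q = "1")) := by
        rintro ⟨-, -, hB' | h1'⟩
        exacts [hB hB', h1 h1']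
      rw [if_neg hWn, if_neg hcn, if_neg hcn]

-- ===== VERDICT (by name: the statement is the Claim_ definition above) =====
theorem destacar_bordas_spec : Claim_equal_destacar_bordas := by
  unfold Claim_equal_destacar_bordas
  intro largura altura imagem _ _
  unfold Spec_destacar_bordas
  have hsA := pvA_shape largura altura imagem
  have hsB := pvB_shape largura altura imagem
  apply pvEq_of_shape_get2 _ _ (hsA.trans hsB.symm)
  intro p q hp hq
  have hp' : p < imagem.length := by rw [← pvShape_length hsA]; exact hp
  have hq' : q < (imagem.getD p []).length := by rw [← pvShape_row hsA]; exact hq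
  rw [pvPointwise largura altura imagem p q hp' hq']
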